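-- pv_equiv track=rewrite | github.com/slayerulan/dallas_1x_new | src/OddGame.py | concat_titles
-- ===== SOURCE A (Python) =====
-- def concat_titles(games):
--     n = []
--     for g in games:
--         for t in g.split(" vs "):
--             if t.strip():
--                 n.append(t.strip())
--     triples = list(zip(n[::3], n[1::3], n[2::3]))
--     return triples
-- ===== SOURCE B (Python) =====
-- def concat_titles(games):
--     res = []
--     cur = []
--     for g in games:
--         for t in g.split(" vs "):
--             s = t.strip()
--             if s:
--                 cur.append(s)
--                 if len(cur) == 3:
--                     res.append(tuple(cur))
--                     cur = []
--     return res
-- ===== Notes on version B (the rewrite author's own statement) =====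
-- stated objective: simpler
-- what changed: Single streaming pass with a 3-element buffer that emits a tuple whenever it fills (dropping a partial trailing buffer), instead of building a flat intermediate list and regrouping it with three stride-3 slices and zip.
import Mathlib
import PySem

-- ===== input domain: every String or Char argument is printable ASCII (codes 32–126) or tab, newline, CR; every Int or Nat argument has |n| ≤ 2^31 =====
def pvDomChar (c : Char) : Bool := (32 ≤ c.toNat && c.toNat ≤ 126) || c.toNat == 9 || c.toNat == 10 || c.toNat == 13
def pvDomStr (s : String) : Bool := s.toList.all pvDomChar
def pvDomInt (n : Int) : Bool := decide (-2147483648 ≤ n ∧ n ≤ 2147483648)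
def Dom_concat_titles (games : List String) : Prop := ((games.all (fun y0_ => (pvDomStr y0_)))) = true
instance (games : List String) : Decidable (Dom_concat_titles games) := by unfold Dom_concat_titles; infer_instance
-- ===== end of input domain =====

-- B replaces A's flat-list-then-three-stride-slices-and-zip regroup by a single streaming pass
-- with a 3-element buffer that emits a triple whenever it fills (objective: simpler).

-- ===== PORT A =====
def concat_titles (games : List String) : List (String × String × String) :=
  let n := games.foldl (fun acc g =>
    ((PySem.Str.split? g " vs ").getD []).foldl (fun acc t =>
      if PySem.Str.strip t ≠ "" then acc ++ [PySem.Str.strip t] else acc) acc) []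
  ((PySem.List.slice? n none none 3).getD []).zip
    (((PySem.List.slice? n (some 1) none 3).getD []).zip
      ((PySem.List.slice? n (some 2) none 3).getD []))

-- ===== PORT B =====
def concat_titles_alt (games : List String) : List (String × String × String) :=
  let st := games.foldl (fun st g =>
    ((PySem.Str.split? g " vs ").getD []).foldl (fun st t =>
      let s := PySem.Str.strip t
      if s ≠ "" then
        let cur := st.2 ++ [s]
        match cur with
        | [x, y, z] => (st.1 ++ [(x, y, z)], ([] : List String))
        | _ => (st.1, cur)
      else st) st)
    (([], []) : List (String × String × String) × List String)
  st.1

-- ===== PRECONDITION & SPEC =====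
def Spec_concat_titles (games : List String) (out : List (String × String × String)) : Prop := out = concat_titles_alt games
instance (games : List String) (out : List (String × String × String)) : Decidable (Spec_concat_titles games out) := by unfold Spec_concat_titles; infer_instance

-- ===== CLAIM (what is proved, stated in full; the proofs are below) =====
def Claim_equal_concat_titles : Prop := ∀ (games : List String), Dom_concat_titles games → Spec_concat_titles games (concat_titles games)

-- ===== LEMMAS AND PROOFS =====

-- every third element, starting at the head (what a stride-3 slice extracts)
def pvEvery3 {α : Type} : List α → List α
  | [] => []
  | x :: rest => x :: pvEvery3 (rest.drop 2)
termination_by l => l.length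
decreasing_by simp

theorem pvEvery3_nil {α : Type} : pvEvery3 ([] : List α) = [] := by
  rw [pvEvery3]

theorem pvEvery3_cons {α : Type} (x : α) (rest : List α) :
    pvEvery3 (x :: rest) = x :: pvEvery3 (rest.drop 2) := by
  rw [pvEvery3]

-- greedy grouping into triples, dropping a trailing partial group
def pvChunk3 {α : Type} : List α → List (α × α × α)
  | a :: b :: c :: rest => (a, b, c) :: pvChunk3 rest
  | _ => []

-- leftover after greedy triple grouping
def pvRem3 {α : Type} : List α → List α
  | _ :: _ :: _ :: rest => pvRem3 rest
  | l => l

-- the cleaned title stream both programs extract, and B's per-title step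
def pvTitles (g : String) : List String :=
  ((PySem.Str.split? g " vs ").getD []).filterMap
    (fun t => if PySem.Str.strip t ≠ "" then some (PySem.Str.strip t) else none)

def pvStepT (st : List (String × String × String) × List String) (s : String) :
    List (String × String × String) × List String :=
  let cur := st.2 ++ [s]
  match cur with
  | [x, y, z] => (st.1 ++ [(x, y, z)], ([] : List String))
  | _ => (st.1, cur)

theorem pvInnerA :
    ∀ (ts : List String) (acc : List String),
      ts.foldl (fun acc t =>
        if PySem.Str.strip t ≠ "" then acc ++ [PySem.Str.strip t] else acc) acc
      = acc ++ ts.filterMap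
          (fun t => if PySem.Str.strip t ≠ "" then some (PySem.Str.strip t) else none) := by
  intro ts
  induction ts with
  | nil => intro acc; simp
  | cons t ts ih =>
    intro acc
    rw [List.foldl_cons, List.filterMap_cons]
    by_cases h : PySem.Str.strip t = ""
    · rw [if_neg (by simpa using h), if_neg (by simpa using h), ih]
    · rw [if_pos (by simpa using h), if_pos (by simpa using h), ih]
      simp

theorem pvFlat :
    ∀ (games : List String) (acc : List String),
      games.foldl (fun acc g =>
        ((PySem.Str.split? g " vs ").getD []).foldl (fun acc t =>
          if PySem.Str.strip t ≠ "" then acc ++ [PySem.Str.strip t] else acc) acc) acc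
      = acc ++ games.flatMap pvTitles := by
  intro games
  induction games with
  | nil => intro acc; simp
  | cons g gs ih =>
    intro acc
    rw [List.foldl_cons, pvInnerA, ih]
    simp [pvTitles]

theorem pvFilterMapEvery3 {α : Type} :
    ∀ (m : Nat) (ys : List α), ys.length ≤ 3 * m →
      (List.range m).filterMap (fun k => ys[3 * k]?) = pvEvery3 ys := by
  intro m
  induction m with
  | zero =>
    intro ys h
    have : ys = [] := List.eq_nil_of_length_eq_zero (by omega)
    subst this
    simp [pvEvery3_nil]
  | succ m ih =>
    intro ys h
    rw [List.range_succ_eq_map, List.filterMap_cons, List.filterMap_map]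
    cases ys with
    | nil =>
      simp only [List.getElem?_nil]
      have := ih ([] : List α) (by simp)
      simpa using this
    | cons y ys' =>
      have h3 : ((fun k => (y :: ys')[3 * k]?) ∘ (· + 1)) = fun k => ((y :: ys').drop 3)[3 * k]? := by
        funext k
        simp only [Function.comp_def, List.getElem?_drop]
        congr 1
        omega
      rw [h3, ih ((y :: ys').drop 3) (by simp only [List.length_drop, List.length_cons] at h ⊢; omega)]
      have hy : (y :: ys')[3 * 0]? = some y := by simp
      rw [hy, pvEvery3_cons]
      simp

theorem pvSlice3 {α : Type} (xs : List α) (a : Nat) :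
    (PySem.List.slice? xs (some (a : Int)) none 3).getD [] = pvEvery3 (xs.drop a) := by
  unfold PySem.List.slice? PySem.List.sliceIndices
  have h1 : ¬((a : Int) < 0) := by simp
  simp only [show ¬((3:Int) = 0) by norm_num, if_false, show ¬((3:Int) < 0) by norm_num,
    if_neg h1, if_pos (show (0:Int) < 3 by norm_num), Option.getD_some]
  rw [← Nat.cast_min]
  set s := min a xs.length with hs
  have hsl : s ≤ xs.length := min_le_right _ _
  have hdrop : xs.drop a = xs.drop s := by
    by_cases hal : a ≤ xs.length
    · rw [hs, min_eq_left hal]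
    · rw [List.drop_eq_nil_of_le (by omega), List.drop_eq_nil_of_le (by omega)]
  rw [hdrop]
  have hidx : (fun (k : Nat) => xs[((s : Int) + 3 * (k : Int)).toNat]?)
      = fun k => (xs.drop s)[3 * k]? := by
    funext k
    rw [List.getElem?_drop]
    have h2 : ((s : Int) + 3 * (k : Int)).toNat = s + 3 * k := by omega
    rw [h2]
  rw [hidx]
  apply pvFilterMapEvery3
  by_cases hlt : s < xs.length
  · rw [if_pos (by exact_mod_cast hlt)]
    simp only [List.length_drop]
    omega
  · rw [if_neg (by exact_mod_cast hlt)]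
    simp only [List.length_drop]
    omega

theorem pvSlice3zero {α : Type} (xs : List α) :
    (PySem.List.slice? xs none none 3).getD [] = pvEvery3 xs := by
  have h : PySem.List.slice? xs none none 3 = PySem.List.slice? xs (some ((0 : Nat) : Int)) none 3 := by
    unfold PySem.List.slice? PySem.List.sliceIndices
    norm_num
  rw [h, pvSlice3, List.drop_zero]

theorem pvSlice3one {α : Type} (xs : List α) :
    (PySem.List.slice? xs (some 1) none 3).getD [] = pvEvery3 (xs.drop 1) := by
  have := pvSlice3 xs 1
  simpa using this

theorem pvSlice3two {α : Type} (xs : List α) :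
    (PySem.List.slice? xs (some 2) none 3).getD [] = pvEvery3 (xs.drop 2) := by
  have := pvSlice3 xs 2
  simpa using this

theorem pvZipChunk {α : Type} : ∀ (n : List α),
    (pvEvery3 n).zip ((pvEvery3 (n.drop 1)).zip (pvEvery3 (n.drop 2))) = pvChunk3 n := by
  intro n
  fun_induction pvChunk3 n with
  | case1 a b c rest ih =>
    simp only [List.drop_succ_cons, List.drop_zero]
    rw [pvEvery3_cons a, pvEvery3_cons b, pvEvery3_cons c]
    simp only [List.drop_succ_cons, List.drop_zero]
    rw [List.zip_cons_cons, List.zip_cons_cons, ih]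
  | case2 l h =>
    match l, h with
    | [], _ => simp [pvEvery3_nil]
    | [a], _ => simp [pvEvery3_cons, pvEvery3_nil]
    | [a, b], _ => simp [pvEvery3_cons, pvEvery3_nil]
    | a :: b :: c :: r, h => exact absurd rfl (h a b c r)

theorem pvInnerB :
    ∀ (ts : List String) (st : List (String × String × String) × List String),
      ts.foldl (fun st t =>
        let s := PySem.Str.strip t
        if s ≠ "" then
          let cur := st.2 ++ [s]
          match cur with
          | [x, y, z] => (st.1 ++ [(x, y, z)], ([] : List String))
          | _ => (st.1, cur)
        else st) st
      = (ts.filterMap (fun t => if PySem.Str.strip t ≠ "" then some (PySem.Str.strip t) else none)).foldl pvStepT st := by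
  intro ts
  induction ts with
  | nil => intro st; simp
  | cons t ts ih =>
    intro st
    rw [List.foldl_cons, List.filterMap_cons]
    by_cases h : PySem.Str.strip t = ""
    · rw [if_neg (by simpa using h), if_neg (by simpa using h)]
      exact ih st
    · rw [if_pos (by simpa using h), if_pos (by simpa using h), List.foldl_cons]
      exact ih _
  
theorem pvOuterB :
    ∀ (games : List String) (st : List (String × String × String) × List String),
      games.foldl (fun st g =>
        ((PySem.Str.split? g " vs ").getD []).foldl (fun st t =>
          let s := PySem.Str.strip t
          if s ≠ "" then
            let cur := st.2 ++ [s]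
            match cur with
            | [x, y, z] => (st.1 ++ [(x, y, z)], ([] : List String))
            | _ => (st.1, cur)
          else st) st) st
      = (games.flatMap pvTitles).foldl pvStepT st := by
  intro games
  induction games with
  | nil => intro st; simp
  | cons g gs ih =>
    intro st
    rw [List.foldl_cons, List.flatMap_cons, List.foldl_append, pvInnerB, ih]
    rfl

theorem pvFoldT :
    ∀ (l : List String) (res : List (String × String × String)) (cur : List String),
      cur.length ≤ 2 →
      l.foldl pvStepT (res, cur)
        = (res ++ pvChunk3 (cur ++ l), pvRem3 (cur ++ l)) := by
  intro l
  induction l with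
  | nil =>
    intro res cur hc
    match cur, hc with
    | [], _ => simp [pvChunk3, pvRem3]
    | [a], _ => simp [pvChunk3, pvRem3]
    | [a, b], _ => simp [pvChunk3, pvRem3]
  | cons s l ih =>
    intro res cur hc
    match cur, hc with
    | [], _ =>
      rw [List.foldl_cons]
      show l.foldl pvStepT (res, [s]) = _
      rw [ih res [s] (by simp)]
      simp
    | [a], _ =>
      rw [List.foldl_cons]
      show l.foldl pvStepT (res, [a, s]) = _
      rw [ih res [a, s] (by simp)]
      simp
    | [a, b], _ =>
      rw [List.foldl_cons]
      show l.foldl pvStepT (res ++ [(a, b, s)], []) = _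
      rw [ih (res ++ [(a, b, s)]) [] (by simp)]
      simp [pvChunk3, pvRem3]

theorem pvAltChar (games : List String) :
    concat_titles_alt games = pvChunk3 (games.flatMap pvTitles) := by
  show (games.foldl _ (([], []) : List (String × String × String) × List String)).1 = _
  rw [pvOuterB, pvFoldT (games.flatMap pvTitles) [] [] (by simp)]
  simp

-- ===== VERDICT (by name: the statement is the Claim_ definition above) =====
theorem concat_titles_spec : Claim_equal_concat_titles := by
  intro games _
  unfold Spec_concat_titles
  rw [pvAltChar]
  show (_ : List String).zip _ = _
  rw [pvFlat games [], List.nil_append, pvSlice3zero, pvSlice3one, pvSlice3two, pvZipChunk]
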